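-- pv_equiv track=rewrite | github.com/pypi-data/pypi-mirror-351 | packages/getserving/getserving-0.1.0a11.tar.gz/getserving-0.1.0a11/serv/routing.py | _find_best_matching_path
-- ===== SOURCE A (Python) =====
-- def _find_best_matching_path(paths: list[str], kwargs: dict) -> str | None:
--     """Find the best matching path based on the provided kwargs.
--
--     This method tries to find a path where all required parameters are provided in kwargs.
--     It prioritizes:
--     1. Paths where all parameters are provided and the most parameters are used
--     2. The most recently added path (last in the list)
--
--     If no path can be fully satisfied, it returns None.
--     """
--     valid_paths = []
--
--     for path in paths:
--         param_names = [
--             part[1:-1]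
--             for part in path.split("/")
--             if part.startswith("{") and part.endswith("}")
--         ]
--
--         # Check if all parameters for this path are provided
--         if all(param in kwargs for param in param_names):
--             # Score is based on how many parameters are used by this path
--             valid_paths.append((path, len(param_names)))
--
--     if not valid_paths:
--         return None
--
--     # Return the path with the most parameters (to use as many kwargs as possible)
--     valid_paths.sort(key=lambda x: x[1], reverse=True)
--     return valid_paths[0][0]
-- ===== SOURCE B (Python) =====
-- def _find_best_matching_path(paths: list[str], kwargs: dict) -> str | None:
--     """Single linear scan: keep the best (highest-parameter-count) satisfiable
--     path seen so far; strict '>' makes the first path among equal scores win,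
--     matching the stable reverse sort of the original."""
--     best_path = None
--     best_score = -1
--     for path in paths:
--         param_names = [
--             part[1:-1]
--             for part in path.split("/")
--             if part.startswith("{") and part.endswith("}")
--         ]
--         if all(param in kwargs for param in param_names):
--             if len(param_names) > best_score:
--                 best_score = len(param_names)
--                 best_path = path
--     return best_path
-- ===== Notes on version B (the rewrite author's own statement) =====
-- stated objective: simpler
-- what changed: Replaces build-a-list-of-valid-paths-then-stable-reverse-sort-and-take-head with a single linear max-scan holding (best_path, best_score) and a strict '>' comparison, so no intermediate list and no sort.
import Mathlib
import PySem

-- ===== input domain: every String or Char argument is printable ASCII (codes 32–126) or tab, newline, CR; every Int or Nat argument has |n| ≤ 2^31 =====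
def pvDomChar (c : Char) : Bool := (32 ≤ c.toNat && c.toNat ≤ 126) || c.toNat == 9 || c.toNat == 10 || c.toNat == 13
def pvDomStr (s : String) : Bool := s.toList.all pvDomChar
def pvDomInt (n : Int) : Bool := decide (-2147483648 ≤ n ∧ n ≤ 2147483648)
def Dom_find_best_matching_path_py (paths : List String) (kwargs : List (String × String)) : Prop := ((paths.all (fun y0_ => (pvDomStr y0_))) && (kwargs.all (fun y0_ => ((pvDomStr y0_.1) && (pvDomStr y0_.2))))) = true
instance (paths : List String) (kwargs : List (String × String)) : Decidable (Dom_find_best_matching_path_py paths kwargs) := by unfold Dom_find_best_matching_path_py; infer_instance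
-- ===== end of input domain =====

-- B replaces A's build-valid-list + stable reverse sort + take-head with a single
-- linear max-scan using a strict '>' comparison (objective: simpler).


-- ===== PORT A =====
-- the list comprehension [part[1:-1] for part in path.split("/") if part.startswith("{") and part.endswith("}")]
def pvParamNames (path : String) : List String :=
  ((PySem.Chars.splitOn path.toList "/".toList).filter
      (fun part => PySem.Chars.startswith part "{".toList && PySem.Chars.endswith part "}".toList)).map
    (fun part => String.ofList (PySem.Chars.slice part (some 1) (some (-1))))

def find_best_matching_path_py (paths : List String) (kwargs : List (String × String)) : Option String :=
  let valid_paths : List (String × Int) :=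
    paths.foldl (fun acc path =>
      let param_names := pvParamNames path
      if param_names.all (fun param => kwargs.any (fun kv => kv.1 == param)) then
        acc ++ [(path, (param_names.length : Int))]
      else acc) []
  if valid_paths.isEmpty then none
  else
    match PySem.List.sorted valid_paths (fun x => x.2) true with
    | [] => none   -- unreachable: valid_paths is nonempty
    | x :: _ => some x.1

-- ===== PORT B =====
def find_best_matching_path_py_alt (paths : List String) (kwargs : List (String × String)) : Option String :=
  (paths.foldl (fun (st : Option String × Int) path =>
      let param_names := pvParamNames path
      if param_names.all (fun param => kwargs.any (fun kv => kv.1 == param)) then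
        if (param_names.length : Int) > st.2 then (some path, (param_names.length : Int)) else st
      else st)
    (none, -1)).1

-- ===== PRECONDITION & SPEC =====
def Spec_find_best_matching_path_py (paths : List String) (kwargs : List (String × String)) (out : Option String) : Prop := out = find_best_matching_path_py_alt paths kwargs
instance (paths : List String) (kwargs : List (String × String)) (out : Option String) : Decidable (Spec_find_best_matching_path_py paths kwargs out) := by unfold Spec_find_best_matching_path_py; infer_instance

-- ===== CLAIM (what is proved, stated in full; the proofs are below) =====
def Claim_equal_find_best_matching_path_py : Prop := ∀ (paths : List String) (kwargs : List (String × String)), Dom_find_best_matching_path_py paths kwargs → Spec_find_best_matching_path_py paths kwargs (find_best_matching_path_py paths kwargs)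

-- ===== LEMMAS AND PROOFS =====

-- first element of maximal second component ("leftmost max")
def pvFirstMax : List (String × Int) → Option (String × Int)
  | [] => none
  | pr :: t =>
    match pvFirstMax t with
    | none => some pr
    | some q => if q.2 > pr.2 then some q else some pr

theorem pvFirstMax_mem (vl : List (String × Int)) (q : String × Int)
    (h : pvFirstMax vl = some q) : q ∈ vl := by
  induction vl with
  | nil => simp [pvFirstMax] at h
  | cons pr t ih =>
    simp only [pvFirstMax] at h
    cases hm : pvFirstMax t with
    | none => rw [hm] at h; simp at h; simp [h]
    | some q' =>
      rw [hm] at h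
      by_cases hgt : q'.2 > pr.2
      · simp [hgt] at h; subst h; exact List.mem_cons_of_mem _ (ih hm)
      · simp [hgt] at h; simp [h]

-- B's linear scan computes pvFirstMax (for any starting state)
theorem pvScan_eq (vl : List (String × Int)) (st : Option String × Int) :
    vl.foldl (fun st pr => if pr.2 > st.2 then (some pr.1, pr.2) else st) st
      = (match pvFirstMax vl with
         | none => st
         | some q => if q.2 > st.2 then (some q.1, q.2) else st) := by
  induction vl generalizing st with
  | nil => simp [pvFirstMax]
  | cons pr t ih =>
    simp only [List.foldl_cons, ih, pvFirstMax]
    cases hm : pvFirstMax t with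
    | none => rfl
    | some q =>
      by_cases h1 : pr.2 > st.2 <;> by_cases h2 : q.2 > pr.2 <;>
        simp [h1, h2] <;> intros <;> first | rfl | (exfalso; omega)

-- head of insertBy (the reverse-before relation) is the scan step on heads
theorem pvHead_insertBy (x : String × Int) (acc : List (String × Int)) :
    (PySem.List.insertBy (fun a b => decide (b.2 < a.2)) x acc).head?
      = (match acc.head? with
         | none => some x
         | some y => if y.2 < x.2 then some x else some y) := by
  cases acc with
  | nil => simp [PySem.List.insertBy]
  | cons y ys =>
    simp only [PySem.List.insertBy, List.head?_cons]
    by_cases h : y.2 < x.2 <;> simp [h]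

-- head of the stable reverse sort is the leftmost max
theorem pvHead_sorted (vl : List (String × Int)) :
    (PySem.List.sorted vl (fun x => x.2) true).head? = pvFirstMax vl := by
  rw [PySem.List.sorted_rev_eq_foldl_insertBy]
  suffices h : ∀ (acc : List (String × Int)),
      (vl.foldl (fun acc x => PySem.List.insertBy (fun a b => decide ((fun x : String × Int => x.2) b < (fun x : String × Int => x.2) a)) x acc) acc).head?
        = (match pvFirstMax vl with
           | none => acc.head?
           | some q => match acc.head? with
                       | none => some q
                       | some y => if y.2 < q.2 then some q else some y) by
    have := h []
    simp only [List.head?_nil] at this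
    rw [this]
    cases pvFirstMax vl <;> rfl
  induction vl with
  | nil => intro acc; simp [pvFirstMax]
  | cons pr t ih =>
    intro acc
    simp only [List.foldl_cons, ih, pvFirstMax, pvHead_insertBy]
    cases hm : pvFirstMax t with
    | none =>
      cases acc.head? with
      | none => rfl
      | some y => rfl
    | some q =>
      cases hacc : acc.head? with
      | none =>
        by_cases h2 : q.2 > pr.2 <;> simp [h2]
      | some y =>
        by_cases h1 : y.2 < pr.2 <;> by_cases h2 : q.2 > pr.2 <;>
          simp [h1, h2] <;> intros <;> first | rfl | (exfalso; omega)

-- B's fold over paths = the scan over A's valid list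
theorem pvAltFold_eq (paths : List String) (kwargs : List (String × String))
    (st : Option String × Int) :
    paths.foldl (fun (st : Option String × Int) path =>
        let param_names := pvParamNames path
        if param_names.all (fun param => kwargs.any (fun kv => kv.1 == param)) then
          if (param_names.length : Int) > st.2 then (some path, (param_names.length : Int)) else st
        else st) st
      = ((paths.filter (fun path => (pvParamNames path).all (fun param => kwargs.any (fun kv => kv.1 == param)))).map
          (fun path => (path, ((pvParamNames path).length : Int)))).foldl
          (fun st pr => if pr.2 > st.2 then (some pr.1, pr.2) else st) st := by
  induction paths generalizing st with
  | nil => rfl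
  | cons p t ih =>
    by_cases h : (pvParamNames p).all (fun param => kwargs.any (fun kv => kv.1 == param)) <;>
      simp [h, ih]

-- ===== VERDICT (by name: the statement is the Claim_ definition above) =====
theorem find_best_matching_path_py_spec : Claim_equal_find_best_matching_path_py := by
  intro paths kwargs _
  unfold Spec_find_best_matching_path_py find_best_matching_path_py find_best_matching_path_py_alt
  rw [PySem.List.foldl_append_if
      (fun path => (pvParamNames path).all (fun param => kwargs.any (fun kv => kv.1 == param)))
      (fun path => (path, ((pvParamNames path).length : Int))) paths []]
  rw [pvAltFold_eq, pvScan_eq]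
  simp only [List.nil_append]
  set vl : List (String × Int) :=
    (paths.filter (fun path => (pvParamNames path).all (fun param => kwargs.any (fun kv => kv.1 == param)))).map
      (fun path => (path, ((pvParamNames path).length : Int))) with hvl
  have hnn : ∀ q ∈ vl, (0 : Int) ≤ q.2 := by
    intro q hq
    rw [hvl] at hq
    obtain ⟨p, _, rfl⟩ := List.mem_map.mp hq
    positivity
  cases hm : pvFirstMax vl with
  | none =>
    have hnil : vl = [] := by
      cases hv : vl with
      | nil => rfl
      | cons a t =>
        exfalso
        rw [hv] at hm
        simp only [pvFirstMax] at hm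
        cases hpt : pvFirstMax t with
        | none => simp only [hpt] at hm; simp at hm
        | some q => simp only [hpt] at hm; split at hm <;> simp at hm
    simp [hnil]
  | some q =>
    have hne : vl ≠ [] := by
      intro h; rw [h] at hm; simp [pvFirstMax] at hm
    have hq : (0 : Int) ≤ q.2 := hnn q (pvFirstMax_mem vl q hm)
    have hgt : q.2 > -1 := by omega
    have hhead := pvHead_sorted vl
    rw [hm] at hhead
    simp only [List.isEmpty_iff, hne, hgt, if_pos]
    cases hs : PySem.List.sorted vl (fun x => x.2) true with
    | nil => rw [hs] at hhead; simp at hhead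
    | cons x t => rw [hs] at hhead; simp at hhead; simp [hhead]
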